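-- pv_equiv track=rewrite | github.com/Liaoqitian/Exam-Generation | questions/python/palindromeNone/tests/ans.py | isPalindromeNone
-- ===== SOURCE A (Python) =====
-- def all_but_first_of(s):
--     return s[1:]
--
-- def all_but_last_of(s):
--     return s[:len(s) - 1]
--
-- def isPalindromeNone(s):
--     if len(s) < 2:
--         return True
--     else:
--         if s[0] == s[len(s) - 1]:
--             return False
--         else:
--             return isPalindromeNone(all_but_first_of(all_but_last_of(s)))
-- ===== SOURCE B (Python) =====
-- def isPalindromeNone(s):
--     i, j = 0, len(s) - 1
--     while i < j:
--         if s[i] == s[j]: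
--             return False
--         i += 1
--         j -= 1
--     return True
-- ===== Notes on version B (the rewrite author's own statement) =====
-- stated objective: faster
-- what changed: Replaces A's recursion that copies the string via two slices at every step with an in-place two-pointer while loop over indices.
import Mathlib
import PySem

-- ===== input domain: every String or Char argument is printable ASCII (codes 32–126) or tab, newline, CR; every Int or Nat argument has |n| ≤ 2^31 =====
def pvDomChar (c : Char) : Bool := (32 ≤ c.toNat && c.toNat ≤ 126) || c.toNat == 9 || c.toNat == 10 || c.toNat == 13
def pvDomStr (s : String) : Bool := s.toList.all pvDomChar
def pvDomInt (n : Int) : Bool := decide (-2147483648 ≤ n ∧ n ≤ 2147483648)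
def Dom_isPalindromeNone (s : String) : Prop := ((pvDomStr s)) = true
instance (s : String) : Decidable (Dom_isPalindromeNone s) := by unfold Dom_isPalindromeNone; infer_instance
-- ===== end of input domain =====

-- B replaces A's recursion (two fresh slices per step) with a two-pointer index loop; objective: faster.

-- ===== PORT A =====
-- s[1:]
def pvAllButFirst (l : List Char) : List Char := PySem.List.slice l (some 1) none
-- s[:len(s)-1]
def pvAllButLast (l : List Char) : List Char := PySem.List.slice l none (some ((l.length : Int) - 1))

theorem pvA_dec (l : List Char) (h : ¬ l.length < 2) :
    (pvAllButFirst (pvAllButLast l)).length < l.length := by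
  unfold pvAllButFirst pvAllButLast
  rw [PySem.List.slice_to l (b := (l.length : Int) - 1) (by omega),
      PySem.List.slice_from _ (by omega)]
  simp
  omega

def pvIsPalA (l : List Char) : Bool :=
  if l.length < 2 then true
  else
    if PySem.List.pyGet? l 0 == PySem.List.pyGet? l ((l.length : Int) - 1) then false
    else pvIsPalA (pvAllButFirst (pvAllButLast l))
termination_by l.length
decreasing_by exact pvA_dec l (by assumption)

def isPalindromeNone (s : String) : Bool := pvIsPalA s.toList

-- ===== PORT B =====
-- the while loop of Source B, on the two indices
def pvLoopB (l : List Char) (i j : Int) : Bool :=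
  if i < j then
    if PySem.List.pyGet? l i == PySem.List.pyGet? l j then false
    else pvLoopB l (i + 1) (j - 1)
  else true
termination_by (j - i).toNat
decreasing_by omega

def isPalindromeNone_alt (s : String) : Bool :=
  pvLoopB s.toList 0 ((s.toList.length : Int) - 1)

-- ===== PRECONDITION & SPEC =====
def Spec_isPalindromeNone (s : String) (out : Bool) : Prop := out = isPalindromeNone_alt s
instance (s : String) (out : Bool) : Decidable (Spec_isPalindromeNone s out) := by unfold Spec_isPalindromeNone; infer_instance

-- ===== CLAIM (what is proved, stated in full; the proofs are below) =====
def Claim_equal_isPalindromeNone : Prop := ∀ (s : String), Dom_isPalindromeNone s → Spec_isPalindromeNone s (isPalindromeNone s)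

-- ===== LEMMAS AND PROOFS =====

-- shifting the window: running B's loop on the trimmed middle equals running it on the full list with both indices shifted by one
theorem pvLoopB_shift (mid : List Char) (x y : Char) :
    ∀ (i j : Int), 0 ≤ i → j < (mid.length : Int) →
      pvLoopB (x :: (mid ++ [y])) (i + 1) (j + 1) = pvLoopB mid i j := by
  intro i j
  induction hn : (j - i).toNat using Nat.strong_induction_on generalizing i j with
  | _ n ih =>
    intro hi hj
    rw [pvLoopB]
    conv_rhs => rw [pvLoopB]
    by_cases hij : i < j
    · have hij' : i + 1 < j + 1 := by omega
      rw [if_pos hij, if_pos hij']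
      have hji : 0 ≤ j := by omega
      have hget : ∀ (k : Int), 0 ≤ k → k < (mid.length : Int) →
          PySem.List.pyGet? (x :: (mid ++ [y])) (k + 1) = PySem.List.pyGet? mid k := by
        intro k hk hk'
        have hk1 : k + 1 = ((k.toNat + 1 : Nat) : Int) := by omega
        rw [hk1, PySem.List.pyGet?_natCast, PySem.List.pyGet?_of_nonneg _ hk]
        simp only [List.getElem?_cons_succ]
        rw [List.getElem?_append_left (by omega)]
      rw [hget i hi (by omega), hget j hji hj]
      by_cases heq : PySem.List.pyGet? mid i == PySem.List.pyGet? mid j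
      · rw [if_pos heq, if_pos heq]
      · rw [if_neg heq, if_neg heq]
        have hj1 : j + 1 - 1 = (j - 1) + 1 := by omega
        rw [hj1]
        exact ih ((j - 1) - (i + 1)).toNat (by omega) (i + 1) (j - 1) rfl (by omega) (by omega)
    · have hij' : ¬ i + 1 < j + 1 := by omega
      rw [if_neg hij, if_neg hij']

theorem pvIsPalA_eq_loop (l : List Char) :
    pvIsPalA l = pvLoopB l 0 ((l.length : Int) - 1) := by
  induction hn : l.length using Nat.strong_induction_on generalizing l with
  | _ n ih =>
    subst hn
    rw [pvIsPalA]
    conv_rhs => rw [pvLoopB]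
    by_cases hlen : l.length < 2
    · have h0 : ¬ (0 : Int) < (l.length : Int) - 1 := by omega
      rw [if_pos hlen, if_neg h0]
    · have hl0 : (0 : Int) < (l.length : Int) - 1 := by omega
      rw [if_neg hlen, if_pos hl0]
      by_cases heq : PySem.List.pyGet? l 0 == PySem.List.pyGet? l ((l.length : Int) - 1)
      · rw [if_pos heq, if_pos heq]
      · rw [if_neg heq, if_neg heq]
        obtain ⟨x, rest, rfl⟩ : ∃ x rest, l = x :: rest := by
          cases l with
          | nil => simp at hlen
          | cons a t => exact ⟨a, t, rfl⟩
        obtain ⟨mid, y, rfl⟩ : ∃ mid y, rest = mid ++ [y] := by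
          rcases List.eq_nil_or_concat rest with h | ⟨mid, y, h⟩
          · subst h; simp at hlen
          · exact ⟨mid, y, by simpa [List.concat_eq_append] using h⟩
        have htrim : pvAllButFirst (pvAllButLast (x :: (mid ++ [y]))) = mid := by
          unfold pvAllButFirst pvAllButLast
          rw [PySem.List.slice_to (x :: (mid ++ [y]))
                (b := ((x :: (mid ++ [y])).length : Int) - 1) (by simp; omega),
              PySem.List.slice_from _ (by omega)]
          have hlen1 : ((((x :: (mid ++ [y])).length : Int) - 1)).toNat = mid.length + 1 := by
            have h2 : (x :: (mid ++ [y])).length = mid.length + 2 := by simp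
            omega
          rw [hlen1, List.take_succ_cons, List.take_append_of_le_length (le_refl mid.length)]
          simp
        rw [htrim, ih mid.length (by simp) mid rfl]
        have h1 : ((x :: (mid ++ [y])).length : Int) - 1 - 1 = ((mid.length : Int) - 1) + 1 := by
          simp
        rw [h1, show (1 : Int) = 0 + 1 from rfl]
        exact (pvLoopB_shift mid x y 0 ((mid.length : Int) - 1) (by omega) (by omega)).symm

-- ===== VERDICT (by name: the statement is the Claim_ definition above) =====
theorem isPalindromeNone_spec : Claim_equal_isPalindromeNone := by
  intro s _
  unfold Spec_isPalindromeNone isPalindromeNone isPalindromeNone_alt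
  exact pvIsPalA_eq_loop s.toList
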